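-- pv_equiv track=rewrite | github.com/xinghun61/infra | appengine/monorail/services/features_svc.py | _DeserializeRuleConsequence
-- ===== SOURCE A (Python) =====
-- def _DeserializeRuleConsequence(consequence):
--   """Decode the THEN-part of a filter rule."""
--   (default_status, default_owner_id, add_cc_ids, add_labels,
--    add_notify) = None, None, [], [], []
--   for action in consequence.split():
--     verb, noun = action.split(':')
--     if verb == 'default_status':
--       default_status = noun
--     elif verb == 'default_owner_id':
--       default_owner_id = int(noun)
--     elif verb == 'add_cc_id':
--       add_cc_ids.append(int(noun))
--     elif verb == 'add_label':
--       add_labels.append(noun)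
--     elif verb == 'add_notify':
--       add_notify.append(noun)
--
--   return (default_status, default_owner_id, add_cc_ids, add_labels,
--           add_notify)
-- ===== SOURCE B (Python) =====
-- def _DeserializeRuleConsequence(consequence):
--   """Decode the THEN-part of a filter rule (group-by-verb version)."""
--   groups = {}
--   for action in consequence.split():
--     verb, noun = action.split(':')
--     groups.setdefault(verb, []).append(noun)
--   status_vals = groups.get('default_status', [])
--   owner_vals = groups.get('default_owner_id', [])
--   return (status_vals[-1] if status_vals else None,
--           int(owner_vals[-1]) if owner_vals else None,
--           [int(n) for n in groups.get('add_cc_id', [])],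
--           groups.get('add_label', []),
--           groups.get('add_notify', []))
-- ===== Notes on version B (the rewrite author's own statement) =====
-- stated objective: alternative
-- what changed: One branch-free pass groups every token's noun by its verb into a dict of lists via setdefault/append, then a second phase reads the five fields out of the dict (last value for the two scalars, the grouped lists otherwise), instead of a five-way if/elif chain updating five accumulators.
import Mathlib
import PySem

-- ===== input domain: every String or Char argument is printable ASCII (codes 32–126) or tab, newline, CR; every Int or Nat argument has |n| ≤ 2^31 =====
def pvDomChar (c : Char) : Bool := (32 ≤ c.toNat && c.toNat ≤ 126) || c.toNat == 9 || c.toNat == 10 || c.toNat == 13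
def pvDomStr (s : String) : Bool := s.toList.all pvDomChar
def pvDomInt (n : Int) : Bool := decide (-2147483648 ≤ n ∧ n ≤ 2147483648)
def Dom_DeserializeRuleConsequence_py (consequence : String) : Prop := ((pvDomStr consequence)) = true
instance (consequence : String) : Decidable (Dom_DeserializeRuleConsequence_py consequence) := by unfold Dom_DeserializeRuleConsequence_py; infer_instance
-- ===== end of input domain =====

-- B replaces A's five-way if/elif chain over five accumulators by one grouping pass into a
-- dict of lists plus a second read-out phase (alternative decomposition, same cost).

-- ===== PORT A =====
-- A's state: (default_status, default_owner_id, add_cc_ids, add_labels, add_notify).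
-- 'verb, noun = action.split(':')' raises unless the split has exactly 2 parts, and int(noun)
-- raises on a non-integer noun; Pre_ excludes those inputs, so the port may leave the state
-- unchanged / use getD 0 there.
def DeserializeRuleConsequence_py (consequence : String) :
    Option String × Option Int × List Int × List String × List String :=
  (PySem.Str.split₀ consequence).foldl
    (fun st action =>
      match PySem.Str.split? action ":" with
      | some [verb, noun] =>
        if verb = "default_status" then (some noun, st.2.1, st.2.2.1, st.2.2.2.1, st.2.2.2.2)
        else if verb = "default_owner_id" then
          (st.1, some ((PySem.Int.ofStr? noun).getD 0), st.2.2.1, st.2.2.2.1, st.2.2.2.2)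
        else if verb = "add_cc_id" then
          (st.1, st.2.1, st.2.2.1 ++ [(PySem.Int.ofStr? noun).getD 0], st.2.2.2.1, st.2.2.2.2)
        else if verb = "add_label" then
          (st.1, st.2.1, st.2.2.1, st.2.2.2.1 ++ [noun], st.2.2.2.2)
        else if verb = "add_notify" then
          (st.1, st.2.1, st.2.2.1, st.2.2.2.1, st.2.2.2.2 ++ [noun])
        else st
      | _ => st)
    (none, none, [], [], [])

-- ===== PORT B =====
-- "verb, noun = action.split(':')" (none = the ValueError unpack, excluded by Pre_)
def pvParse (action : String) : Option (String × String) :=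
  let parts := (PySem.Str.split? action ":").getD []
  if h : parts.length = 2 then some (parts[0], parts[1]) else none

-- phase 1: groups.setdefault(verb, []).append(noun)  (= modify verb [] (· ++ [noun]))
def pvGroups (consequence : String) : PySem.Dict String (List String) :=
  (PySem.Str.split₀ consequence).foldl
    (fun d action =>
      match pvParse action with
      | some (verb, noun) => d.modify verb [] (· ++ [noun])
      | none => d)
    PySem.Dict.empty

-- phase 2: read the five fields out of the dict
def DeserializeRuleConsequence_py_alt (consequence : String) :
    Option String × Option Int × List Int × List String × List String :=
  let groups := pvGroups consequence
  ((groups.getD "default_status" []).getLast?,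
   ((groups.getD "default_owner_id" []).getLast?).map (fun n => (PySem.Int.ofStr? n).getD 0),
   (groups.getD "add_cc_id" []).map (fun n => (PySem.Int.ofStr? n).getD 0),
   groups.getD "add_label" [],
   groups.getD "add_notify" [])

-- ===== PRECONDITION & SPEC =====
-- Pre_ excludes exactly the inputs on which Python A raises: a whitespace token without exactly
-- one ':' (ValueError from unpacking), or a default_owner_id / add_cc_id noun int() rejects.
def pvTokOK (action : String) : Bool :=
  match pvParse action with
  | some (verb, noun) =>
    if verb = "default_owner_id" ∨ verb = "add_cc_id" then (PySem.Int.ofStr? noun).isSome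
    else true
  | none => false

def Pre_DeserializeRuleConsequence_py (consequence : String) : Prop :=
  ∀ action ∈ PySem.Str.split₀ consequence, pvTokOK action = true
instance (consequence : String) : Decidable (Pre_DeserializeRuleConsequence_py consequence) := by
  unfold Pre_DeserializeRuleConsequence_py; infer_instance

def pvWitness_DeserializeRuleConsequence_py : String :=
  "default_status:New add_cc_id:3 default_owner_id:7 add_label:Hot add_notify:a@b.c"

def Spec_DeserializeRuleConsequence_py (consequence : String)
    (out : Option String × Option Int × List Int × List String × List String) : Prop :=
  out = DeserializeRuleConsequence_py_alt consequence
instance (consequence : String)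
    (out : Option String × Option Int × List Int × List String × List String) :
    Decidable (Spec_DeserializeRuleConsequence_py consequence out) := by
  unfold Spec_DeserializeRuleConsequence_py; infer_instance

-- ===== CLAIM (what is proved, stated in full; the proofs are below) =====
def Claim_equal_DeserializeRuleConsequence_py : Prop :=
  ∀ (consequence : String), Dom_DeserializeRuleConsequence_py consequence →
    Pre_DeserializeRuleConsequence_py consequence →
    Spec_DeserializeRuleConsequence_py consequence (DeserializeRuleConsequence_py consequence)

-- ===== LEMMAS AND PROOFS =====

theorem pvGetLast?_cons {α : Type} (x : α) (xs : List α) :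
    (x :: xs).getLast? = xs.getLast?.or (some x) := by
  cases hc : xs.getLast? with
  | none => rw [List.getLast?_eq_none_iff.mp hc]; rfl
  | some z => simp [List.getLast?_cons, hc]

theorem pvFoldlFilterMap {α β γ : Type} (l : List α) (f : α → Option β) (g : γ → β → γ)
    (init : γ) :
    (l.filterMap f).foldl g init
      = l.foldl (fun acc a => match f a with | some b => g acc b | none => acc) init := by
  induction l generalizing init with
  | nil => rfl
  | cons a t ih => rw [List.filterMap_cons]; cases hfa : f a <;> simp [List.foldl_cons, hfa, ih]

def pvNouns (tokens : List String) (v : String) : List String :=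
  ((tokens.filterMap pvParse).filter (fun p => p.1 == v)).map (·.2)

theorem pvNouns_cons_pair (t : List String) (a verb noun : String)
    (h : pvParse a = some (verb, noun)) (v : String) :
    pvNouns (a :: t) v = (if verb == v then [noun] else []) ++ pvNouns t v := by
  simp only [pvNouns, List.filterMap_cons, h]
  by_cases hv : verb == v
  · simp [hv]
  · simp [hv]

theorem pvNouns_cons_skip (t : List String) (a : String)
    (h : pvParse a = none) (v : String) :
    pvNouns (a :: t) v = pvNouns t v := by
  simp only [pvNouns, List.filterMap_cons, h]

-- characterisation of A's fold, generalized over the five accumulators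
theorem A_fold_char (tokens : List String)
    (ds : Option String) (doi : Option Int) (cc : List Int) (lb nt : List String) :
    tokens.foldl
      (fun st action =>
        match PySem.Str.split? action ":" with
        | some [verb, noun] =>
          if verb = "default_status" then (some noun, st.2.1, st.2.2.1, st.2.2.2.1, st.2.2.2.2)
          else if verb = "default_owner_id" then
            (st.1, some ((PySem.Int.ofStr? noun).getD 0), st.2.2.1, st.2.2.2.1, st.2.2.2.2)
          else if verb = "add_cc_id" then
            (st.1, st.2.1, st.2.2.1 ++ [(PySem.Int.ofStr? noun).getD 0], st.2.2.2.1, st.2.2.2.2)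
          else if verb = "add_label" then
            (st.1, st.2.1, st.2.2.1, st.2.2.2.1 ++ [noun], st.2.2.2.2)
          else if verb = "add_notify" then
            (st.1, st.2.1, st.2.2.1, st.2.2.2.1, st.2.2.2.2 ++ [noun])
          else st
        | _ => st)
      (ds, doi, cc, lb, nt)
    = ((pvNouns tokens "default_status").getLast?.or ds,
       (((pvNouns tokens "default_owner_id").getLast?).map
          (fun n => (PySem.Int.ofStr? n).getD 0)).or doi,
       cc ++ (pvNouns tokens "add_cc_id").map (fun n => (PySem.Int.ofStr? n).getD 0),
       lb ++ pvNouns tokens "add_label",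
       nt ++ pvNouns tokens "add_notify") := by
  induction tokens generalizing ds doi cc lb nt with
  | nil => simp [pvNouns]
  | cons a t ih =>
    rw [List.foldl_cons]
    cases hs : PySem.Str.split? a ":" with
    | none =>
      have hp : pvParse a = none := by simp [pvParse, hs]
      simp only [pvNouns_cons_skip t a hp]
      exact ih ds doi cc lb nt
    | some l =>
      match l with
      | [] =>
        have hp : pvParse a = none := by simp [pvParse, hs]
        simp only [pvNouns_cons_skip t a hp]
        exact ih ds doi cc lb nt
      | [_] =>
        have hp : pvParse a = none := by simp [pvParse, hs]
        simp only [pvNouns_cons_skip t a hp]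
        exact ih ds doi cc lb nt
      | _ :: _ :: _ :: _ =>
        have hp : pvParse a = none := by simp [pvParse, hs]
        simp only [pvNouns_cons_skip t a hp]
        exact ih ds doi cc lb nt
      | [verb, noun] =>
        have hp : pvParse a = some (verb, noun) := by simp [pvParse, hs]
        simp only []
        by_cases h1 : verb = "default_status"
        · subst h1; rw [if_pos rfl, ih]
          simp [pvNouns_cons_pair t a _ _ hp, pvGetLast?_cons]
        · rw [if_neg h1]
          by_cases h2 : verb = "default_owner_id"
          · subst h2; rw [if_pos rfl, ih]
            simp [pvNouns_cons_pair t a _ _ hp, h1, pvGetLast?_cons]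
          · rw [if_neg h2]
            by_cases h3 : verb = "add_cc_id"
            · subst h3; rw [if_pos rfl, ih]
              simp [pvNouns_cons_pair t a _ _ hp, h1, h2]
            · rw [if_neg h3]
              by_cases h4 : verb = "add_label"
              · subst h4; rw [if_pos rfl, ih]
                simp [pvNouns_cons_pair t a _ _ hp, h1, h2, h3]
              · rw [if_neg h4]
                by_cases h5 : verb = "add_notify"
                · subst h5; rw [if_pos rfl, ih]
                  simp [pvNouns_cons_pair t a _ _ hp, h1, h2, h3, h4]
                · rw [if_neg h5, ih]
                  simp [pvNouns_cons_pair t a _ _ hp, h1, h2, h3, h4, h5]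

-- B's grouping loop is a fold over the parsed pairs …
theorem pvGroups_eq (consequence : String) :
    pvGroups consequence
      = ((PySem.Str.split₀ consequence).filterMap pvParse).foldl
          (fun d p => d.modify p.1 [] (· ++ [p.2])) PySem.Dict.empty := by
  rw [pvFoldlFilterMap]
  unfold pvGroups
  apply PySem.List.foldl_congr_mem
  intro d a _
  cases hp : pvParse a with
  | none => simp [hp]
  | some p => cases p; simp [hp]

-- … so each dict lookup is exactly the grouped noun list
theorem groups_getD (consequence : String) (v : String) :
    (pvGroups consequence).getD v [] = pvNouns (PySem.Str.split₀ consequence) v := by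
  rw [pvGroups_eq, PySem.Dict.getD_foldl_modify_append]
  simp [pvNouns]

-- ===== VERDICT (by name: the statement is the Claim_ definition above) =====
theorem DeserializeRuleConsequence_py_spec : Claim_equal_DeserializeRuleConsequence_py := by
  intro consequence _ _
  unfold Spec_DeserializeRuleConsequence_py DeserializeRuleConsequence_py
    DeserializeRuleConsequence_py_alt
  rw [A_fold_char]
  simp [groups_getD]
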